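-- pv_equiv track=rewrite | github.com/greekvirus1/simple-blackjack-ascii-cards | 4-blackjack.py | displayCards
-- ===== SOURCE A (Python) =====
-- def displayCards(hand, showHiddenCard = True):
--     if showHiddenCard:
--         rows = ["    ","    ","    ","    "]
--         rows[0] += " ___  " * len(hand)
--         for card in hand:
--             cardTop = "{}  ".format(card[0])
--             cardBtm = "__{}".format(card[0])
--             rows[1] += "|" + cardTop[0:3] + "| "
--             rows[2] += "| {} | ".format(card[1])
--             rows[3] += "|" + cardBtm[-3:] + "| "
--     else:
--         rows = ["     ___  ", "    |## | ", "    | # | ", "    |_##| "]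
--         rows[0] += " ___  " *(len(hand) - 1)
--         for card in hand[1:]:
--             cardTop = "{}  ".format(card[0])
--             cardBtm = "__{}".format(card[0])
--             rows[1] += "|" + cardTop[0:3] + "| "
--             rows[2] += "| {} | ".format(card[1])
--             rows[3] += "|" + cardBtm[-3:] + "| "
--     displayThis = ""
--     for row in rows:
--         displayThis += row + "\n"
--     return displayThis
-- ===== SOURCE B (Python) =====
-- def displayCards(hand, showHiddenCard = True):
--     def block(card):
--         return [" ___  ",
--                 "|" + (card[0] + "  ")[0:3] + "| ",
--                 "| " + card[1] + " | ",
--                 "|" + ("__" + card[0])[-3:] + "| "]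
--     if showHiddenCard:
--         blocks = [block(c) for c in hand]
--     else:
--         blocks = [[" ___  ", "|## | ", "| # | ", "|_##| "]] + [block(c) for c in hand[1:]]
--     return "".join("    " + "".join(b[i] for b in blocks) + "\n" for i in range(4))
-- ===== Notes on version B (the rewrite author's own statement) =====
-- stated objective: simpler
-- what changed: B builds a 4-line block per card (with a fixed hidden-card block first when showHiddenCard is false) and assembles the output by one column-wise str.join over the blocks, replacing A's duplicated branch bodies and four parallel row accumulators grown by repeated += in a loop.
import Mathlib
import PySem

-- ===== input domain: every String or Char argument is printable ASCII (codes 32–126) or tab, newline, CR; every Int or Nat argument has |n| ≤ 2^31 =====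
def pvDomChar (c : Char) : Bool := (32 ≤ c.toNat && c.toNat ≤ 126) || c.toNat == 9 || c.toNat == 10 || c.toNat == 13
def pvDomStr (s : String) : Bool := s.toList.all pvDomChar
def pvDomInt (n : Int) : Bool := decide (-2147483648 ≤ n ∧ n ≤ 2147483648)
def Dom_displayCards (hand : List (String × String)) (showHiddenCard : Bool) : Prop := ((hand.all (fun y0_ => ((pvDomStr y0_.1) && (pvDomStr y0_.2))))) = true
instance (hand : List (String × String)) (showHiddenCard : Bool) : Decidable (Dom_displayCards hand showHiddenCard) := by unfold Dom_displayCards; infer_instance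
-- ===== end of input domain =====

-- B builds each card as a 4-line block and assembles the four rows by a column-wise
-- (transpose) pass over the blocks, instead of A's four parallel row accumulators
-- mutated in one loop; objective: simpler decomposition, same cost. Return value only;
-- neither version mutates its arguments.

-- ===== PORT A =====
-- A's loop body: extends the three body-row accumulators with this card's pieces
-- (strings are carried as List Char; the final String is assembled once at the end).
def dcStepA (acc : List Char × List Char × List Char) (card : String × String) :
    List Char × List Char × List Char :=
  let cardTop := card.1.toList ++ [' ', ' ']          -- "{}  ".format(card[0])
  let cardBtm := ['_', '_'] ++ card.1.toList          -- "__{}".format(card[0])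
  (acc.1 ++ '|' :: PySem.List.slice cardTop (some 0) (some 3) ++ ['|', ' '],
   acc.2.1 ++ ['|', ' '] ++ card.2.toList ++ [' ', '|', ' '],
   acc.2.2 ++ '|' :: PySem.List.slice cardBtm (some (-3)) none ++ ['|', ' '])

def displayCards (hand : List (String × String)) (showHiddenCard : Bool) : String :=
  let rows : List (List Char) :=
    if showHiddenCard then
      let r0 := "    ".toList ++ (List.replicate hand.length " ___  ".toList).flatten
      let b := hand.foldl dcStepA ("    ".toList, "    ".toList, "    ".toList)
      [r0, b.1, b.2.1, b.2.2]
    else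
      let r0 := "     ___  ".toList ++ (List.replicate (hand.length - 1) " ___  ".toList).flatten
      let b := (PySem.List.slice hand (some 1) none).foldl dcStepA
                 ("    |## | ".toList, "    | # | ".toList, "    |_##| ".toList)
      [r0, b.1, b.2.1, b.2.2]
  String.ofList (rows.foldl (fun acc row => acc ++ row ++ ['\n']) [])

-- ===== PORT B =====
-- B's per-card 4-line block.
def dcBlock (card : String × String) : List (List Char) :=
  [" ___  ".toList,
   '|' :: PySem.List.slice (card.1.toList ++ [' ', ' ']) (some 0) (some 3) ++ ['|', ' '],
   ['|', ' '] ++ card.2.toList ++ [' ', '|', ' '],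
   '|' :: PySem.List.slice (['_', '_'] ++ card.1.toList) (some (-3)) none ++ ['|', ' ']]

def dcHiddenBlock : List (List Char) :=
  [" ___  ".toList, "|## | ".toList, "| # | ".toList, "|_##| ".toList]

def displayCards_alt (hand : List (String × String)) (showHiddenCard : Bool) : String :=
  let blocks : List (List (List Char)) :=
    if showHiddenCard then hand.map dcBlock
    else dcHiddenBlock :: (PySem.List.slice hand (some 1) none).map dcBlock
  String.ofList
    (((List.range 4).map (fun i =>
        "    ".toList ++ (blocks.map (fun b => b.getD i [])).flatten ++ ['\n'])).flatten)

-- ===== PRECONDITION & SPEC =====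
def Spec_displayCards (hand : List (String × String)) (showHiddenCard : Bool) (out : String) : Prop := out = displayCards_alt hand showHiddenCard
instance (hand : List (String × String)) (showHiddenCard : Bool) (out : String) : Decidable (Spec_displayCards hand showHiddenCard out) := by unfold Spec_displayCards; infer_instance

-- ===== CLAIM (what is proved, stated in full; the proofs are below) =====
def Claim_equal_displayCards : Prop := ∀ (hand : List (String × String)) (showHiddenCard : Bool), Dom_displayCards hand showHiddenCard → Spec_displayCards hand showHiddenCard (displayCards hand showHiddenCard)

-- ===== LEMMAS AND PROOFS =====

-- A's three-accumulator loop equals the concatenation of B's per-card block lines.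
theorem dcStepA_foldl (hand : List (String × String)) (r1 r2 r3 : List Char) :
    hand.foldl dcStepA (r1, r2, r3) =
      (r1 ++ (hand.map (fun c => (dcBlock c).getD 1 [])).flatten,
       r2 ++ (hand.map (fun c => (dcBlock c).getD 2 [])).flatten,
       r3 ++ (hand.map (fun c => (dcBlock c).getD 3 [])).flatten) := by
  induction hand generalizing r1 r2 r3 with
  | nil => simp
  | cons c t ih =>
    simp only [List.foldl_cons, List.map_cons, List.flatten_cons]
    rw [dcStepA, ih]
    simp [dcBlock]

-- a row of " ___  " repeated n times is the flatten of the top lines of any n blocks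
theorem dcTop_flatten (hand : List (String × String)) :
    (hand.map (fun c => (dcBlock c).getD 0 [])).flatten =
      (List.replicate hand.length " ___  ".toList).flatten := by
  induction hand with
  | nil => rfl
  | cons c t ih => simp [dcBlock, List.replicate_succ]

theorem displayCards_spec : Claim_equal_displayCards := by
  intro hand showHiddenCard _
  unfold Spec_displayCards displayCards displayCards_alt
  cases showHiddenCard with
  | true =>
    simp only [dcStepA_foldl]
    rw [show (List.range 4) = [0,1,2,3] from rfl]
    simp only [List.map_cons, List.map_nil, List.flatten_cons, List.flatten_nil]
    rw [← dcTop_flatten]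
    simp [Function.comp_def]
  | false =>
    simp only [Bool.false_eq_true, reduceIte, dcStepA_foldl]
    rw [show (List.range 4) = [0,1,2,3] from rfl]
    simp only [List.map_cons, List.map_nil, List.flatten_cons, List.flatten_nil,
      List.map_map, Function.comp_def, dcHiddenBlock]
    rw [dcTop_flatten (PySem.List.slice hand (some 1) none),
      show (PySem.List.slice hand (some 1) none).length = hand.length - 1 from by
        rw [PySem.List.slice_from_one]; simp]
    simp

-- ===== VERDICT (by name: the statement is the Claim_ definition above) =====
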